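-- pv_equiv track=rewrite | github.com/Dimitri-Kfoury/AlgoExpertQuestions | Assessment_4/Question_3_1.py | countContainedPermutations
-- ===== SOURCE A (Python) =====
-- def countContainedPermutations(bigString, smallString):
--     original_char_map = {}
--
--     for char in smallString:
--         if char in original_char_map:
--             original_char_map[char] += 1
--         else:
--             original_char_map[char] = 1
--
--
--     possible_matches = []
--     count = 0
--     for i in range(len(bigString)):
--         current_char = bigString[i]
--         if current_char in original_char_map:
--             possible_matches.append(original_char_map.copy())
--             elements_to_keep = []
--             for j in range(len(possible_matches)):
--
--                 possible_match = possible_matches[j]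
--                 if current_char in possible_match:
--                     possible_match[current_char] -= 1
--                     if possible_match[current_char] == 0:
--                         possible_match.__delitem__(current_char)
--                     if possible_match:
--                         count +=1
--                         continue
--                     elements_to_keep.append(j)
--             possible_matches = [possible_matches[p] for p in elements_to_keep]
--
--
--
--     return count
-- ===== SOURCE B (Python) =====
-- def countContainedPermutations(bigString, smallString):
--     chars = set(smallString)
--     return sum(1 for c in bigString if c in chars)
-- ===== Notes on version B (the rewrite author's own statement) =====
-- stated objective: faster
-- what changed: Replaces the per-character dict-copy/decrement simulation with a single set-membership count over bigString.
-- intended difference: When smallString is a single character that occurs in bigString, A returns 0 (its freshly copied one-entry map empties before the count is incremented) while B returns the number of occurrences of that character in bigString, which is the correct count of contained single-character permutations. — e.g. on countContainedPermutations("aba", "a"): A returns 0, B returns 2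
import Mathlib
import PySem

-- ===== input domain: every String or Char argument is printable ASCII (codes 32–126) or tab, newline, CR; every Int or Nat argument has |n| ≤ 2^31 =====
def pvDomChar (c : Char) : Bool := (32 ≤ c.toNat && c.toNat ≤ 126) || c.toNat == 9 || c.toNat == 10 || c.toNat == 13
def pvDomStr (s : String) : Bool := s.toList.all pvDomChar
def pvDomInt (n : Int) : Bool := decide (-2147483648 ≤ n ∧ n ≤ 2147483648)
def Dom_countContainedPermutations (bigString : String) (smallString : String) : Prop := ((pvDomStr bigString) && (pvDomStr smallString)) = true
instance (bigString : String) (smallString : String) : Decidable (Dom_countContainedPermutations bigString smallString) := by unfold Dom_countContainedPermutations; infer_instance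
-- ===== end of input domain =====

-- B counts bigString characters lying in smallString's character set in one pass instead of
-- simulating per-character dict copies; objective: faster. On single-character smallStrings whose
-- character occurs in bigString, A and B intentionally differ (see D_ below).

-- ===== PORT A =====
-- inner loop over possible_matches (+ the freshly appended copy): accumulates (count, elements kept)
def pvA_inner (c : Char) (acc : Int × List (PySem.Dict Char Int)) (pm : PySem.Dict Char Int) :
    Int × List (PySem.Dict Char Int) :=
  if pm.contains c then
    let pm1 := pm.modify c 0 (fun v => v - 1)
    let pm2 := if pm1.getD c 0 = 0 then pm1.erase c else pm1
    if pm2.size ≠ 0 then (acc.1 + 1, acc.2) else (acc.1, acc.2 ++ [pm2])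
  else acc

-- one iteration of the outer loop over bigString; state = (possible_matches, count)
def pvA_step (orig : PySem.Dict Char Int) (st : List (PySem.Dict Char Int) × Int) (c : Char) :
    List (PySem.Dict Char Int) × Int :=
  if orig.contains c then
    let r := (st.1 ++ [orig]).foldl (pvA_inner c) (st.2, [])
    (r.2, r.1)
  else st

def countContainedPermutations (bigString : String) (smallString : String) : Int :=
  let orig := smallString.toList.foldl
    (fun d ch => if d.contains ch then d.modify ch 0 (fun v => v + 1) else d.insert ch 1)
    PySem.Dict.empty
  (bigString.toList.foldl (pvA_step orig) ([], 0)).2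

-- ===== PORT B =====
def countContainedPermutations_alt (bigString : String) (smallString : String) : Int :=
  let chars : PySem.Set Char := PySem.Set.ofList smallString.toList
  ((bigString.toList.filter (fun c => PySem.Set.contains chars c)).map (fun _ => (1 : Int))).sum

-- ===== PRECONDITION & SPEC =====
-- When smallString is a single character that occurs in bigString, A returns 0 (its freshly copied
-- one-entry map empties before the count is incremented) while B returns the number of occurrences
-- of that character in bigString, which is the correct count of contained single-character permutations.
def D_countContainedPermutations (bigString : String) (smallString : String) : Prop :=
  smallString.toList.length = 1 ∧ ∃ c ∈ smallString.toList, c ∈ bigString.toList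
instance (bigString : String) (smallString : String) : Decidable (D_countContainedPermutations bigString smallString) := by unfold D_countContainedPermutations; infer_instance

def Spec_countContainedPermutations (bigString : String) (smallString : String) (out : Int) : Prop := ¬ D_countContainedPermutations bigString smallString → out = countContainedPermutations_alt bigString smallString
instance (bigString : String) (smallString : String) (out : Int) : Decidable (Spec_countContainedPermutations bigString smallString out) := by unfold Spec_countContainedPermutations; infer_instance

def pvDiffWitness_countContainedPermutations : String × String := ("aba", "a")
def pvDiffWitnessOut_countContainedPermutations : Int × Int := (0, 2)

-- ===== CLAIM (what is proved, stated in full; the proofs are below) =====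
def Claim_unchanged_countContainedPermutations : Prop := ∀ (bigString : String) (smallString : String), Dom_countContainedPermutations bigString smallString → Spec_countContainedPermutations bigString smallString (countContainedPermutations bigString smallString)
def Claim_changed_countContainedPermutations : Prop := Dom_countContainedPermutations (pvDiffWitness_countContainedPermutations.1) (pvDiffWitness_countContainedPermutations.2) ∧ D_countContainedPermutations (pvDiffWitness_countContainedPermutations.1) (pvDiffWitness_countContainedPermutations.2) ∧ countContainedPermutations (pvDiffWitness_countContainedPermutations.1) (pvDiffWitness_countContainedPermutations.2) = pvDiffWitnessOut_countContainedPermutations.1 ∧ countContainedPermutations_alt (pvDiffWitness_countContainedPermutations.1) (pvDiffWitness_countContainedPermutations.2) = pvDiffWitnessOut_countContainedPermutations.2 ∧ pvDiffWitnessOut_countContainedPermutations.1 ≠ pvDiffWitnessOut_countContainedPermutations.2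
def Claim_exact_countContainedPermutations : Prop := ∀ (bigString : String) (smallString : String), Dom_countContainedPermutations bigString smallString → D_countContainedPermutations bigString smallString → countContainedPermutations bigString smallString ≠ countContainedPermutations_alt bigString smallString

-- ===== LEMMAS AND PROOFS =====

lemma modify_not_contains (d : PySem.Dict Char Int) (ch : Char) (h : d.contains ch = false) :
    d.modify ch 0 (fun v => v + 1) = d.insert ch 1 := by
  simp [PySem.Dict.modify, PySem.Dict.getD_of_not_contains (d0 := (0:Int)) d h]

lemma build_eq (s : List Char) :
    s.foldl (fun d ch => if d.contains ch then d.modify ch 0 (fun v => v + 1) else d.insert ch 1)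
      PySem.Dict.empty = PySem.Dict.counter s := by
  rw [PySem.Dict.counter_eq_foldl]
  congr 1
  funext d ch
  by_cases h : d.contains ch
  · simp [h]
  · simp only [Bool.not_eq_true] at h
    simp only [h]
    exact (modify_not_contains d ch h).symm

-- key nonemptiness fact
lemma pm2_size_ne (s : List Char) (hs : 2 ≤ s.length) (c : Char) (hc : c ∈ s) :
    (let pm1 := (PySem.Dict.counter s).modify c 0 (fun v => v - 1)
     (if pm1.getD c 0 = 0 then pm1.erase c else pm1).size) ≠ 0 := by
  intro h
  simp only at h
  have hkeys : ((PySem.Dict.counter s).modify c 0 (fun v => v - 1)).keys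
      = PySem.Set.ofList s := by
    rw [PySem.Dict.keys_modify,
      PySem.Dict.keys_insert_of_contains _ _ (by simp [PySem.Dict.contains_counter, hc]),
      PySem.Dict.keys_counter]
  by_cases h1 : s.count c = 1
  · obtain ⟨d, hd, hdc⟩ : ∃ d ∈ s, d ≠ c := by
      by_contra hall
      push Not at hall
      have : s.count c = s.length := by
        rw [List.count_eq_length]
        intro x hx; exact (hall x hx).symm
      omega
    have hgd : ((PySem.Dict.counter s).modify c 0 (fun v => v - 1)).getD c 0 = 0 := by
      rw [PySem.Dict.getD_modify_self, PySem.Dict.getD_counter]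
      omega
    rw [if_pos hgd] at h
    have hdk : d ∈ ((PySem.Dict.counter s).modify c 0 (fun v => v - 1)).keys := by
      rw [hkeys]; exact (PySem.Set.mem_ofList _ _).mpr hd
    obtain ⟨⟨d', v⟩, hmem, hfst⟩ := List.mem_map.mp hdk
    subst hfst
    have : ((d', v)) ∈ (((PySem.Dict.counter s).modify c 0 (fun v => v - 1)).erase c).items := by
      simp [PySem.Dict.erase, List.mem_filter, hmem, hdc]
    have := List.length_pos_of_mem this
    simp only [PySem.Dict.size] at h
    omega
  · have hcnt : 1 ≤ s.count c := List.one_le_count_iff.mpr hc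
    have hgd : ((PySem.Dict.counter s).modify c 0 (fun v => v - 1)).getD c 0 ≠ 0 := by
      rw [PySem.Dict.getD_modify_self, PySem.Dict.getD_counter]
      omega
    rw [if_neg hgd] at h
    have hck : c ∈ ((PySem.Dict.counter s).modify c 0 (fun v => v - 1)).keys := by
      rw [hkeys]; exact (PySem.Set.mem_ofList _ _).mpr hc
    have := List.length_pos_of_mem hck
    simp only [PySem.Dict.keys, List.length_map, PySem.Dict.size] at this h
    omega

lemma step_ge2 (s : List Char) (hs : 2 ≤ s.length) (c : Char) (hc : c ∈ s) (cnt : Int) :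
    pvA_step (PySem.Dict.counter s) ([], cnt) c = ([], cnt + 1) := by
  have hcon : (PySem.Dict.counter s).contains c = true := by
    simp [PySem.Dict.contains_counter, hc]
  unfold pvA_step
  rw [if_pos hcon]
  simp only [List.nil_append, List.foldl_cons, List.foldl_nil]
  unfold pvA_inner
  rw [if_pos hcon]
  simp only
  rw [if_pos (by simpa using pm2_size_ne s hs c hc)]

lemma step_notmem (orig : PySem.Dict Char Int) (st : List (PySem.Dict Char Int) × Int) (c : Char)
    (h : orig.contains c = false) : pvA_step orig st c = st := by
  unfold pvA_step
  rw [h]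
  simp

lemma pvA_loop_ge2' (s : List Char) (hs : 2 ≤ s.length) (bl : List Char) (cnt : Int) :
    bl.foldl (pvA_step (PySem.Dict.counter s)) ([], cnt) =
      ([], cnt + ((bl.filter (fun c => PySem.Set.contains (PySem.Set.ofList s) c)).map
        (fun _ => (1 : Int))).sum) := by
  induction bl generalizing cnt with
  | nil => simp
  | cons c bl ih =>
    by_cases hc : c ∈ s
    · rw [List.foldl_cons, step_ge2 s hs c hc, ih, List.filter_cons_of_pos
        (by simp [PySem.Set.mem_ofList, hc])]
      simp only [List.map_cons, List.sum_cons]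
      ring_nf
    · rw [List.foldl_cons, step_notmem _ _ _ (by simp [PySem.Dict.contains_counter, hc]), ih,
        List.filter_cons_of_neg (by simp [PySem.Set.mem_ofList, hc])]

lemma counter_single (c0 : Char) :
    PySem.Dict.counter [c0] = PySem.Dict.mk [(c0, (1 : Int))] := by
  apply PySem.Dict.ext
  simp [PySem.Dict.counter_eq_foldl, PySem.Dict.modify, PySem.Dict.insert,
    PySem.Dict.getD, PySem.Dict.get?, PySem.Dict.empty]

lemma inner_empty (c : Char) (acc : Int × List (PySem.Dict Char Int)) :
    pvA_inner c acc (PySem.Dict.mk []) = acc := by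
  unfold pvA_inner
  simp [PySem.Dict.contains_mk]

lemma foldl_inner_empties (c : Char) (acc : Int × List (PySem.Dict Char Int))
    (pms : List (PySem.Dict Char Int)) (h : ∀ pm ∈ pms, pm = PySem.Dict.mk []) :
    pms.foldl (pvA_inner c) acc = acc := by
  induction pms generalizing acc with
  | nil => rfl
  | cons pm pms ih =>
    rw [List.foldl_cons, h pm (by simp), inner_empty, ih _ (fun x hx => h x (by simp [hx]))]

lemma inner_single (c0 : Char) (acc : Int × List (PySem.Dict Char Int)) :
    pvA_inner c0 acc (PySem.Dict.mk [(c0, (1 : Int))]) = (acc.1, acc.2 ++ [PySem.Dict.mk []]) := by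
  unfold pvA_inner
  simp [PySem.Dict.contains_mk, PySem.Dict.modify, PySem.Dict.insert, PySem.Dict.getD,
    PySem.Dict.get?_mk_cons, PySem.Dict.erase, PySem.Dict.size]

lemma pvA_loop_one' (c0 : Char) (bl : List Char) (pms : List (PySem.Dict Char Int)) (cnt : Int)
    (hpms : ∀ pm ∈ pms, pm = PySem.Dict.mk []) :
    (bl.foldl (pvA_step (PySem.Dict.counter [c0])) (pms, cnt)).2 = cnt := by
  induction bl generalizing pms with
  | nil => rfl
  | cons c bl ih =>
    rw [List.foldl_cons]
    by_cases hc : (PySem.Dict.counter [c0]).contains c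
    · have hcc : c = c0 := by
        simpa [PySem.Dict.contains_counter] using hc
      subst hcc
      unfold pvA_step
      rw [if_pos hc]
      simp only
      rw [List.foldl_append, foldl_inner_empties _ _ _ hpms, List.foldl_cons, List.foldl_nil,
        counter_single, inner_single]
      exact ih _ (by simp)
    · rw [step_notmem _ _ _ (by simpa using hc)]
      exact ih _ hpms

lemma pvA_empty_small (bl : List Char) (st : List (PySem.Dict Char Int) × Int) :
    bl.foldl (pvA_step (PySem.Dict.counter [])) st = st := by
  induction bl generalizing st with
  | nil => rfl
  | cons c bl ih =>
    rw [List.foldl_cons, step_notmem _ _ _ (by simp [PySem.Dict.contains_counter]), ih]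

lemma pvA_small_one (bigString smallString : String) (c0 : Char)
    (hsl : smallString.toList = [c0]) :
    countContainedPermutations bigString smallString = 0 := by
  unfold countContainedPermutations
  simp only
  rw [build_eq, hsl]
  exact pvA_loop_one' c0 _ [] 0 (by simp)

lemma pvB_sum_nonneg (bl : List Char) (p : Char → Bool) :
    0 ≤ ((bl.filter p).map (fun _ => (1 : Int))).sum := by
  induction bl with
  | nil => simp
  | cons c bl ih =>
    by_cases hc : p c
    · rw [List.filter_cons_of_pos hc]; simp only [List.map_cons, List.sum_cons]; omega
    · rw [List.filter_cons_of_neg (by simpa using hc)]; exact ih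

lemma pvB_pos_of_mem (bl : List Char) (p : Char → Bool) (c : Char) (hc : c ∈ bl) (hp : p c) :
    0 < ((bl.filter p).map (fun _ => (1 : Int))).sum := by
  induction bl with
  | nil => simp at hc
  | cons d bl ih =>
    rcases List.mem_cons.mp hc with h | h
    · subst h
      rw [List.filter_cons_of_pos hp]
      simp only [List.map_cons, List.sum_cons]
      have := pvB_sum_nonneg bl p
      omega
    · by_cases hd : p d
      · rw [List.filter_cons_of_pos hd]
        simp only [List.map_cons, List.sum_cons]
        have := ih h
        omega
      · rw [List.filter_cons_of_neg (by simpa using hd)]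
        exact ih h

lemma pv_main (bigString smallString : String)
    (hD : ¬ D_countContainedPermutations bigString smallString) :
    countContainedPermutations bigString smallString = countContainedPermutations_alt bigString smallString := by
  rcases hsl : smallString.toList with _ | ⟨c0, _ | ⟨c1, rest⟩⟩
  · -- empty small: both 0
    unfold countContainedPermutations countContainedPermutations_alt
    simp only
    rw [build_eq, hsl, pvA_empty_small]
    have hf : ∀ c, PySem.Set.contains (PySem.Set.ofList ([] : List Char)) c = false := by
      intro c
      by_contra hc
      simp only [Bool.not_eq_false] at hc
      have : c ∈ PySem.Set.ofList ([] : List Char) := by simpa using hc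
      exact absurd ((PySem.Set.mem_ofList _ _).mp this) (by simp)
    simp [hf]
  · -- single char, c0 not in big (else D_ would hold)
    have hc0 : c0 ∉ bigString.toList := by
      intro hmem
      exact hD ⟨by rw [hsl]; rfl, c0, by rw [hsl]; simp, hmem⟩
    rw [pvA_small_one bigString smallString c0 hsl]
    unfold countContainedPermutations_alt
    simp only [hsl]
    have hfil : bigString.toList.filter
        (fun c => PySem.Set.contains (PySem.Set.ofList [c0]) c) = [] := by
      rw [List.filter_eq_nil_iff]
      intro c hc hcc
      have : c ∈ PySem.Set.ofList [c0] := by simpa using hcc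
      have : c = c0 := by simpa [PySem.Set.mem_ofList] using this
      exact hc0 (this ▸ hc)
    rw [hfil]
    simp
  · -- length ≥ 2
    unfold countContainedPermutations countContainedPermutations_alt
    simp only
    rw [build_eq, hsl, pvA_loop_ge2' _ (by simp) _ 0]
    simp

-- ===== VERDICT (by name: the statement is the Claim_ definition above) =====
theorem countContainedPermutations_spec : Claim_unchanged_countContainedPermutations := by
  intro bigString smallString _ hD
  exact pv_main bigString smallString hD

theorem countContainedPermutations_changed : Claim_changed_countContainedPermutations := by
  unfold Claim_changed_countContainedPermutations
  have h1 : pvDiffWitness_countContainedPermutations.2.toList = ['a'] := rfl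
  have h2 : pvDiffWitness_countContainedPermutations.1.toList = ['a', 'b', 'a'] := rfl
  refine ⟨by decide, ⟨by rw [h1]; rfl, 'a', by rw [h1]; simp, by rw [h2]; simp⟩, ?_, by rfl, by decide⟩
  exact pvA_small_one _ _ 'a' h1

theorem countContainedPermutations_tight : Claim_exact_countContainedPermutations := by
  intro bigString smallString _ hD
  obtain ⟨hlen, c0, hc0s, hc0b⟩ := hD
  obtain ⟨c, hsl⟩ : ∃ c, smallString.toList = [c] := by
    rcases h : smallString.toList with _ | ⟨c, _ | _⟩ <;> simp [h] at hlen ⊢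
  rw [hsl] at hc0s
  have hcc : c0 = c := by simpa using hc0s
  subst hcc
  rw [pvA_small_one bigString smallString c0 hsl]
  unfold countContainedPermutations_alt
  simp only [hsl]
  have := pvB_pos_of_mem bigString.toList
    (fun c => PySem.Set.contains (PySem.Set.ofList [c0]) c) c0 hc0b
    (by simp [PySem.Set.mem_ofList])
  omega
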